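-- pv_equiv track=rewrite | github.com/jman48/NWEN241_Project1 | core.py | get_url_file_name
-- ===== SOURCE A (Python) =====
-- def get_url_file_name(url):
--     """
--     This function gets the filename from the url provided.
--
--     If no file name is specified then it returns index.html as the file name
--
--     :param url: The url of the file
--     :return: The name of the file from the url
--     """
--
--     last_index = 0
--     file_name_defined = False
--
--     # find last '/'
--     index = len(url) - 1
--
--     # loop backwards over the url until we find the first '/'. This indicates the start index of the file name
--     while index > 0:
--         if url[index] == '/':
--             last_index = index + 1  # Plus 1 so we exclude the '/'
--             break
--         # If we do not find a '.' before the '/' then the file name must not be defined.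
--         if url[index] == '.':
--             file_name_defined = True
--         index -= 1
--
--     # Return the filename or index.html if the file name is not defined
--     if file_name_defined:
--         return url[last_index:]
--     return 'index.html'
-- ===== SOURCE B (Python) =====
-- def get_url_file_name(url):
--     """Return the filename part of the url, or 'index.html' if none is named."""
--     name = ''
--     for ch in url:
--         name = '' if ch == '/' else name + ch
--     return name if '.' in name else 'index.html'
-- ===== Notes on version B (the rewrite author's own statement) =====
-- stated objective: simpler
-- what changed: A scans backwards by index from the end looking for '/' and '.' with a break and two state variables, never examining index 0; B is a single forward pass that keeps the current path segment in an accumulator (reset on '/'), then checks it for a dot; constant-factor gain from iterating characters directly instead of bounds-checked indexing per position.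
-- intended difference: On urls whose only '/' is at position 0, or that start with '.' with no later '/' or '.', A never examines index 0 and so returns the leading slash as part of the name ('/a.txt' -> '/a.txt') or misses the dot and returns 'index.html' for '.txt'; B returns the text after the last slash ('a.txt', '.txt'), which is the intended filename. — e.g. on get_url_file_name("/a.txt"): A returns "/a.txt", B returns "a.txt"
import Mathlib
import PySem

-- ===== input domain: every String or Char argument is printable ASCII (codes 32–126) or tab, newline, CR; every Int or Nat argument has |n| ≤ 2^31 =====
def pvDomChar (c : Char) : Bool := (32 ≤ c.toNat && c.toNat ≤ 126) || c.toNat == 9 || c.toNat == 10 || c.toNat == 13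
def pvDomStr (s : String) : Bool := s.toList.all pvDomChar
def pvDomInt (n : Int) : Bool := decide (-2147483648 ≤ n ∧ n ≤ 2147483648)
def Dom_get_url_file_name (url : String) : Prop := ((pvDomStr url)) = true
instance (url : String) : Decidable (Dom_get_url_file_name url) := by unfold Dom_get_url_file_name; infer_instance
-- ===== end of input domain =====

-- B replaces A's backward index scan (two state variables and a break) with a single forward
-- fold keeping the current path segment; on the index-0 corner that A's loop never examines
-- (stated in D_ below) B returns the intended filename instead.

-- ===== PORT A =====
-- A's backward while-loop: index runs len-1, len-2, …, 1 (loop guard 'index > 0'),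
-- so url[index] is always in range and List.getD is exact here.
def pvALoop (cs : List Char) : Nat → Bool → Nat × Bool
  | 0, d => (0, d)                                    -- loop exit: index ≤ 0
  | i+1, d =>
      if cs.getD (i+1) ' ' = '/' then (i+2, d)        -- last_index = index + 1; break
      else pvALoop cs i (d || decide (cs.getD (i+1) ' ' = '.'))

def get_url_file_name (url : String) : String :=
  let cs := url.toList
  let r := pvALoop cs (cs.length - 1) false           -- (last_index, file_name_defined)
  -- url[last_index:] with 0 ≤ last_index ≤ len(url): the slice is List.drop
  if r.2 then String.ofList (cs.drop r.1) else "index.html"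

-- ===== PORT B =====
-- name = '' if ch == '/' else name + ch
def pvBStep (acc : List Char) (c : Char) : List Char :=
  if c = '/' then [] else acc ++ [c]

def get_url_file_name_alt (url : String) : String :=
  let name := url.toList.foldl pvBStep []
  if PySem.Chars.isIn ['.'] name then String.ofList name else "index.html"

-- ===== PRECONDITION & SPEC =====
-- On urls whose only '/' is at position 0, or that start with '.' with no later '/' or '.',
-- A never examines index 0 and so returns the leading slash as part of the name ('/a.txt' ->
-- '/a.txt') or misses the dot and returns 'index.html' for '.txt'; B returns the text after
-- the last slash ('a.txt', '.txt'), which is the intended filename.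
def D_get_url_file_name (url : String) : Prop :=
  '/' ∉ url.toList.drop 1 ∧
  ((url.toList.head? = some '/' ∧ '.' ∈ url.toList.drop 1) ∨
   (url.toList.head? = some '.' ∧ '.' ∉ url.toList.drop 1))
instance (url : String) : Decidable (D_get_url_file_name url) := by
  unfold D_get_url_file_name; infer_instance

def Spec_get_url_file_name (url : String) (out : String) : Prop :=
  ¬ D_get_url_file_name url → out = get_url_file_name_alt url
instance (url : String) (out : String) : Decidable (Spec_get_url_file_name url out) := by
  unfold Spec_get_url_file_name; infer_instance

def pvDiffWitness_get_url_file_name : String := "/a.txt"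
def pvDiffWitnessOut_get_url_file_name : String × String := ("/a.txt", "a.txt")

-- ===== CLAIM (what is proved, stated in full; the proofs are below) =====
def Claim_unchanged_get_url_file_name : Prop := ∀ (url : String), Dom_get_url_file_name url → Spec_get_url_file_name url (get_url_file_name url)
def Claim_changed_get_url_file_name : Prop := Dom_get_url_file_name (pvDiffWitness_get_url_file_name) ∧ D_get_url_file_name (pvDiffWitness_get_url_file_name) ∧ get_url_file_name (pvDiffWitness_get_url_file_name) = pvDiffWitnessOut_get_url_file_name.1 ∧ get_url_file_name_alt (pvDiffWitness_get_url_file_name) = pvDiffWitnessOut_get_url_file_name.2 ∧ pvDiffWitnessOut_get_url_file_name.1 ≠ pvDiffWitnessOut_get_url_file_name.2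
def Claim_exact_get_url_file_name : Prop := ∀ (url : String), Dom_get_url_file_name url → D_get_url_file_name url → get_url_file_name url ≠ get_url_file_name_alt url

-- ===== LEMMAS AND PROOFS =====

-- '.' in name  ↔  '.' ∈ name
lemma pv_isIn_dot (l : List Char) : PySem.Chars.isIn ['.'] l = true ↔ '.' ∈ l := by
  rw [PySem.Chars.isIn_iff_infix]
  constructor
  · intro h; exact h.mem (by simp)
  · intro h
    obtain ⟨s, t, rfl⟩ := List.append_of_mem h
    exact ⟨s, t, by simp⟩

lemma pv_tw_len_ne {l : List Char} (h : '/' ∈ l) :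
    ¬ (l.takeWhile (· ≠ '/')).length = l.length := by
  intro he
  have hself := (List.takeWhile_prefix (l := l) (· ≠ '/')).eq_of_length he
  rw [List.takeWhile_eq_self_iff] at hself
  simpa using hself _ h

lemma pv_tw_all {l : List Char} (h : '/' ∉ l) : l.takeWhile (· ≠ '/') = l := by
  rw [List.takeWhile_eq_self_iff]
  intro x hx
  simp only [decide_eq_true_eq]
  rintro rfl; exact h hx

-- the text after the last '/' (the whole string if there is none)
def pvName (cs : List Char) : List Char := (cs.reverse.takeWhile (· ≠ '/')).reverse

-- B's fold
lemma pvB_fold (cs : List Char) : ∀ acc,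
    cs.foldl pvBStep acc = if '/' ∈ cs then pvName cs else acc ++ cs := by
  induction cs with
  | nil => intro acc; simp
  | cons c cs ih =>
    intro acc
    simp only [List.foldl_cons, pvBStep]
    by_cases hc : c = '/'
    · subst hc
      rw [if_pos rfl, ih [], if_pos (List.mem_cons_self ..)]
      unfold pvName
      rw [List.reverse_cons, List.takeWhile_append]
      by_cases hs : '/' ∈ cs
      · rw [if_neg (pv_tw_len_ne (by simpa using hs)), if_pos hs]
      · rw [if_neg hs, pv_tw_all (by simpa using hs)]
        simp
    · rw [if_neg hc, ih (acc ++ [c])]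
      have hmem : ('/' ∈ c :: cs) ↔ ('/' ∈ cs) := by
        simp [List.mem_cons, Ne.symm hc]
      by_cases hs : '/' ∈ cs
      · rw [if_pos hs, if_pos (hmem.2 hs)]
        unfold pvName
        rw [List.reverse_cons, List.takeWhile_append,
            if_neg (pv_tw_len_ne (by simpa using hs))]
      · rw [if_neg hs, if_neg (fun h => hs (hmem.1 h))]
        simp

lemma pvB_name (cs : List Char) : cs.foldl pvBStep [] = pvName cs := by
  rw [pvB_fold cs []]
  by_cases h : '/' ∈ cs
  · rw [if_pos h]
  · rw [if_neg h]
    unfold pvName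
    rw [pv_tw_all (by simpa using h), List.reverse_reverse, List.nil_append]

lemma pvB_eq (url : String) :
    get_url_file_name_alt url =
      if '.' ∈ pvName url.toList then String.ofList (pvName url.toList) else "index.html" := by
  unfold get_url_file_name_alt
  rw [pvB_name]
  by_cases h : '.' ∈ pvName url.toList
  · rw [if_pos ((pv_isIn_dot _).2 h), if_pos h]
  · rw [if_neg (fun hh => h ((pv_isIn_dot _).1 hh)), if_neg h]

-- the characters A's loop walks over, in scan order: indices i, i-1, …, 1
def pvWs (cs : List Char) (i : Nat) : List Char := ((cs.take (i+1)).drop 1).reverse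

lemma pvWs_length (cs : List Char) (i : Nat) (h : i < cs.length) :
    (pvWs cs i).length = i := by
  unfold pvWs
  simp
  omega

lemma pvWs_succ (cs : List Char) (i : Nat) (h : i + 1 < cs.length) :
    pvWs cs (i+1) = cs.getD (i+1) ' ' :: pvWs cs i := by
  unfold pvWs
  rw [List.take_add_one]
  have hg : cs[i+1]? = some cs[i+1] := List.getElem?_eq_getElem h
  rw [hg, List.getD, hg]
  simp only [Option.toList_some, Option.getD_some]
  rw [List.drop_append_of_le_length (by simp; omega)]
  simp

lemma pvA_loop (cs : List Char) : ∀ (i : Nat) (d : Bool), i < cs.length →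
    pvALoop cs i d =
      if '/' ∈ pvWs cs i then
        (i - ((pvWs cs i).takeWhile (· ≠ '/')).length + 1,
         d || decide ('.' ∈ (pvWs cs i).takeWhile (· ≠ '/')))
      else (0, d || decide ('.' ∈ pvWs cs i)) := by
  intro i
  induction i with
  | zero =>
    intro d _
    have : pvWs cs 0 = [] := by unfold pvWs; simp
    simp [pvALoop, this]
  | succ i ih =>
    intro d h
    rw [pvWs_succ cs i h]
    set c := cs.getD (i+1) ' ' with hc
    unfold pvALoop
    by_cases hsl : c = '/'
    · rw [if_pos hsl]
      rw [if_pos (by rw [hsl]; exact List.mem_cons_self ..)]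
      rw [hsl]
      simp
    · rw [if_neg hsl, ih _ (by omega)]
      have htw : (c :: pvWs cs i).takeWhile (· ≠ '/') = c :: (pvWs cs i).takeWhile (· ≠ '/') := by
        rw [List.takeWhile_cons, if_pos (by simpa using hsl)]
      have hmem : ('/' ∈ c :: pvWs cs i) ↔ ('/' ∈ pvWs cs i) := by
        simp [List.mem_cons, Ne.symm hsl]
      by_cases hs : '/' ∈ pvWs cs i
      · rw [if_pos hs, if_pos (hmem.2 hs), htw]
        have hlen : ((pvWs cs i).takeWhile (· ≠ '/')).length ≤ i := by
          have := List.IsPrefix.length_le (List.takeWhile_prefix (l := pvWs cs i) (· ≠ '/'))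
          rw [pvWs_length cs i (by omega)] at this
          exact this
        rw [Prod.mk.injEq]
        refine ⟨by simp only [List.length_cons]; omega, ?_⟩
        simp [List.mem_cons, Bool.or_assoc, eq_comm, List.getD, hc]
      · rw [if_neg hs, if_neg (fun hh => hs (hmem.1 hh))]
        rw [Prod.mk.injEq]
        refine ⟨rfl, ?_⟩
        simp [List.mem_cons, Bool.or_assoc, eq_comm, List.getD, hc]

-- A's result, stated over the decomposed character list
lemma pvA_eq (url : String) (c0 : Char) (rest : List Char) (h : url.toList = c0 :: rest) :
    get_url_file_name url =
      if '/' ∈ rest.reverse then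
        (if '.' ∈ rest.reverse.takeWhile (· ≠ '/') then
          String.ofList ((rest.reverse.takeWhile (· ≠ '/')).reverse) else "index.html")
      else
        (if '.' ∈ rest then String.ofList (c0 :: rest) else "index.html") := by
  simp only [get_url_file_name, h]
  have hlen : (c0 :: rest).length - 1 = rest.length := by simp
  have hws : pvWs (c0 :: rest) rest.length = rest.reverse := by
    unfold pvWs
    rw [List.take_of_length_le (by simp)]
    simp
  rw [hlen, pvA_loop (c0 :: rest) rest.length false (by simp), hws]
  by_cases hs : '/' ∈ rest.reverse
  · rw [if_pos hs, if_pos hs]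
    set tw := rest.reverse.takeWhile (· ≠ '/') with htw
    have hpre : tw <+: rest.reverse := List.takeWhile_prefix _
    have hlt : tw.length ≤ rest.length := by
      have := hpre.length_le; simpa using this
    have hdrop : (c0 :: rest).drop (rest.length - tw.length + 1) = tw.reverse := by
      have htake : tw = rest.reverse.take tw.length := List.prefix_iff_eq_take.1 hpre
      rw [List.drop_succ_cons]
      have : rest.reverse.take tw.length = (rest.drop (rest.length - tw.length)).reverse :=
        List.take_reverse
      rw [htake, this, List.reverse_reverse]
      congr 1
      simp only [List.length_reverse, List.length_drop]
      omega
    by_cases hd : '.' ∈ tw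
    · rw [if_pos (by simpa using hd), if_pos hd]
      simp only []
      rw [hdrop]
    · rw [if_neg (by simpa using hd), if_neg hd]
  · rw [if_neg hs, if_neg hs]
    by_cases hd : '.' ∈ rest
    · rw [if_pos (by simpa using hd), if_pos hd]
      simp
    · rw [if_neg (by simpa using hd), if_neg hd]

lemma pvName_cons_slash (c0 : Char) (rest : List Char) (hs : '/' ∈ rest.reverse) :
    pvName (c0 :: rest) = (rest.reverse.takeWhile (· ≠ '/')).reverse := by
  unfold pvName
  rw [List.reverse_cons, List.takeWhile_append, if_neg (pv_tw_len_ne hs)]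

lemma pvName_cons_sl0 (rest : List Char) (hs : '/' ∉ rest) :
    pvName ('/' :: rest) = rest := by
  unfold pvName
  have h1 : rest.reverse.takeWhile (· ≠ '/') = rest.reverse := pv_tw_all (by simpa using hs)
  rw [List.reverse_cons, List.takeWhile_append, if_pos (by rw [h1])]
  simp [List.takeWhile]

lemma pvName_cons_nosl (c0 : Char) (rest : List Char) (hs : '/' ∉ rest) (h0 : ¬ c0 = '/') :
    pvName (c0 :: rest) = c0 :: rest := by
  unfold pvName
  have h1 : rest.reverse.takeWhile (· ≠ '/') = rest.reverse := pv_tw_all (by simpa using hs)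
  rw [List.reverse_cons, List.takeWhile_append, if_pos (by rw [h1])]
  simp [List.takeWhile, h0]

-- ===== VERDICT (by name: the statement is the Claim_ definition above) =====
theorem get_url_file_name_spec : Claim_unchanged_get_url_file_name := by
  intro url _
  unfold Spec_get_url_file_name
  intro hnD
  rw [pvB_eq]
  cases hcs : url.toList with
  | nil =>
    simp only [get_url_file_name, hcs, pvName]
    simp [pvALoop]
  | cons c0 rest =>
    simp only [D_get_url_file_name, hcs, List.drop_succ_cons, List.drop_zero,
      List.head?_cons, Option.some.injEq] at hnD
    rw [pvA_eq url c0 rest hcs]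
    by_cases hs : '/' ∈ rest.reverse
    · rw [if_pos hs, pvName_cons_slash c0 rest hs]
      by_cases hd : '.' ∈ rest.reverse.takeWhile (· ≠ '/')
      · rw [if_pos hd, if_pos (by simpa using hd)]
      · rw [if_neg hd, if_neg (by simpa using hd)]
    · rw [if_neg hs]
      have hnr : '/' ∉ rest := by simpa using hs
      have hnD' : ¬ ((c0 = '/' ∧ '.' ∈ rest) ∨ (c0 = '.' ∧ '.' ∉ rest)) :=
        fun hc => hnD ⟨hnr, hc⟩
      by_cases h0 : c0 = '/'
      · subst h0
        rw [pvName_cons_sl0 rest hnr]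
        have hdot : '.' ∉ rest := fun hd => hnD' (Or.inl ⟨rfl, hd⟩)
        rw [if_neg hdot, if_neg hdot]
      · rw [pvName_cons_nosl c0 rest hnr h0]
        by_cases hd : '.' ∈ rest
        · rw [if_pos hd, if_pos (List.mem_cons_of_mem c0 hd)]
        · have h0d : ¬ c0 = '.' := fun hh => hnD' (Or.inr ⟨hh, hd⟩)
          rw [if_neg hd, if_neg (by
            simp only [List.mem_cons]
            rintro (hh | hh)
            · exact h0d hh.symm
            · exact hd hh)]

theorem get_url_file_name_changed : Claim_changed_get_url_file_name := by
  unfold Claim_changed_get_url_file_name; decide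

theorem get_url_file_name_tight : Claim_exact_get_url_file_name := by
  intro url _ hD
  obtain ⟨hns, hcase⟩ := hD
  cases hcs : url.toList with
  | nil =>
    rw [hcs] at hcase
    rcases hcase with ⟨h, _⟩ | ⟨h, _⟩ <;> simp at h
  | cons c0 rest =>
    rw [hcs] at hns hcase
    simp only [List.drop_succ_cons, List.drop_zero, List.head?_cons, Option.some.injEq] at hns hcase
    have hs : '/' ∉ rest.reverse := by simpa using hns
    rw [pvA_eq url c0 rest hcs, pvB_eq, hcs, if_neg hs]
    rcases hcase with ⟨h0, hd⟩ | ⟨h0, hd⟩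
    · subst h0
      rw [pvName_cons_sl0 rest hns, if_pos hd, if_pos hd]
      intro he
      have hl := congrArg String.toList he
      rw [String.toList_ofList, String.toList_ofList] at hl
      exact List.cons_ne_self _ _ hl
    · subst h0
      rw [if_neg hd, pvName_cons_nosl '.' rest hns (by decide),
          if_pos (List.mem_cons_self ..)]
      intro he
      have hl := congrArg String.toList he
      rw [String.toList_ofList] at hl
      have hh := congrArg List.head? hl
      simp at hh
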